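-- pv_equiv track=rewrite | github.com/bxff/remarkable-tldraw | rmc/src/rmc/exporters/tldraw.py | subtract_char_set_keys
-- ===== SOURCE A (Python) =====
-- TLDRAW_CHARS = "0123456789ABCDEFGHIJKLMNOPQRSTUVWXYZabcdefghijklmnopqrstuvwxyz"
--
-- TLDRAW_CHARS_DICT = {char: i for i, char in enumerate(TLDRAW_CHARS)}
--
-- def subtract_char_set_keys(a: str, b: str) -> str:
--     """
--     Subtract two character set keys (a - b).
--
--     Args:
--         a: First key (minuend)
--         b: Second key (subtrahend)
--
--     Returns:
--         The difference as a character set key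
--     """
--     base = len(TLDRAW_CHARS)
--     max_len = max(len(a), len(b))
--     padded_a = a.rjust(max_len, TLDRAW_CHARS[0])
--     padded_b = b.rjust(max_len, TLDRAW_CHARS[0])
--
--     result = []
--     borrow = 0
--
--     for i in range(max_len - 1, -1, -1):
--         digit_a = TLDRAW_CHARS_DICT[padded_a[i]]
--         digit_b = TLDRAW_CHARS_DICT[padded_b[i]] + borrow
--
--         if digit_a < digit_b:
--             borrow = 1
--             digit_a += base
--         else:
--             borrow = 0
--
--         difference = digit_a - digit_b
--         result.append(TLDRAW_CHARS[difference])
--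
--     if borrow > 0:
--         raise ValueError("Subtraction result is negative")
--
--     # Remove leading zeros
--     result_str = ''.join(reversed(result))
--     result_str = result_str.lstrip(TLDRAW_CHARS[0]) or TLDRAW_CHARS[0]
--
--     return result_str
-- ===== SOURCE B (Python) =====
-- TLDRAW_CHARS = "0123456789ABCDEFGHIJKLMNOPQRSTUVWXYZabcdefghijklmnopqrstuvwxyz"
--
-- TLDRAW_CHARS_DICT = {char: i for i, char in enumerate(TLDRAW_CHARS)}
--
--
-- def subtract_char_set_keys(a: str, b: str) -> str:
--     """Subtract two character set keys (a - b) via integer conversion."""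
--     base = len(TLDRAW_CHARS)
--     va = 0
--     for ch in a:
--         va = va * base + TLDRAW_CHARS_DICT[ch]
--     vb = 0
--     for ch in b:
--         vb = vb * base + TLDRAW_CHARS_DICT[ch]
--     diff = va - vb
--     if diff < 0:
--         raise ValueError("Subtraction result is negative")
--     digits = []
--     while diff > 0:
--         diff, r = divmod(diff, base)
--         digits.append(TLDRAW_CHARS[r])
--     return ''.join(reversed(digits)) or TLDRAW_CHARS[0]
-- ===== Notes on version B (the rewrite author's own statement) =====
-- stated objective: simpler
-- what changed: B decodes both keys to a single integer each, subtracts them, and re-encodes the difference by repeated divmod, instead of A's per-digit schoolbook subtraction with a borrow flag followed by leading-zero stripping.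
import Mathlib
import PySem

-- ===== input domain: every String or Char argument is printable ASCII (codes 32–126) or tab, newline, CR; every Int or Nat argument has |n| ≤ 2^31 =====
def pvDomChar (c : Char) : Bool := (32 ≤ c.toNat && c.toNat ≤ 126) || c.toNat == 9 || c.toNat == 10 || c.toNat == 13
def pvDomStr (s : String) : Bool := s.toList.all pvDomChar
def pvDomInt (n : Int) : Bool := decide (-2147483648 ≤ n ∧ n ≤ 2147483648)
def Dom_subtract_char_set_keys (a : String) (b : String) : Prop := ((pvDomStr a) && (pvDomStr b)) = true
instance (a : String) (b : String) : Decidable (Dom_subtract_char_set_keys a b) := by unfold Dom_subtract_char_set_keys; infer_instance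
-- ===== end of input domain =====

-- B converts both keys to one integer each, subtracts, and re-encodes by repeated divmod,
-- instead of A's per-digit borrow subtraction with leading-zero stripping (objective: simpler).


-- ===== PORT A =====
-- TLDRAW_CHARS, as a list of characters
def pvChars : List Char := "0123456789ABCDEFGHIJKLMNOPQRSTUVWXYZabcdefghijklmnopqrstuvwxyz".toList
-- TLDRAW_CHARS_DICT[c]; for c not in the dict Python raises KeyError (excluded by Pre_)
def pvDval (c : Char) : Nat := pvChars.idxOf c

-- A's loop 'for i in range(max_len-1,-1,-1)' over the two padded strings, as the obvious
-- structural recursion over the reversed padded character lists; returns (result, borrow).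
def pvLoopA : List Char → List Char → Nat → (List Char × Nat)
  | [], _, borrow => ([], borrow)
  | _ :: _, [], borrow => ([], borrow)   -- unreachable: the padded lists have equal length
  | ca :: ra, cb :: rb, borrow =>
      let da := pvDval ca
      let db := pvDval cb + borrow
      let p := if da < db then (da + 62, 1) else (da, 0)
      let d := p.1 - db
      let r := pvLoopA ra rb p.2
      (pvChars.getD d '0' :: r.1, r.2)

def subtract_char_set_keys (a : String) (b : String) : String :=
  let la := a.toList
  let lb := b.toList
  let maxLen := max la.length lb.length
  let pa := List.replicate (maxLen - la.length) '0' ++ la   -- a.rjust(max_len, '0')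
  let pb := List.replicate (maxLen - lb.length) '0' ++ lb   -- b.rjust(max_len, '0')
  let r := pvLoopA pa.reverse pb.reverse 0
  -- Python raises ValueError when r.2 > 0; such inputs are excluded by Pre_
  let stripped := r.1.reverse.dropWhile (· = '0')           -- ''.join(reversed(result)).lstrip('0')
  String.mk (if stripped = [] then ['0'] else stripped)     -- '… or TLDRAW_CHARS[0]'

-- ===== PORT B =====
-- B's 'while diff > 0: diff, r = divmod(diff, 62); digits.append(...)' then reversal,
-- as the obvious recursion producing the digits most-significant first.
def pvEncode (n : Nat) : List Char :=
  if h : n = 0 then [] else pvEncode (n / 62) ++ [pvChars.getD (n % 62) '0']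
decreasing_by exact Nat.div_lt_self (Nat.pos_of_ne_zero h) (by norm_num)

def subtract_char_set_keys_alt (a : String) (b : String) : String :=
  let va := a.toList.foldl (fun v c => v * 62 + pvDval c) 0
  let vb := b.toList.foldl (fun v c => v * 62 + pvDval c) 0
  if va < vb then "0"   -- Python raises ValueError here; excluded by Pre_
  else
    let ds := pvEncode (va - vb)
    if ds = [] then "0" else String.mk ds                   -- '… or TLDRAW_CHARS[0]'

-- ===== PRECONDITION & SPEC =====
-- Pre_ excludes exactly the inputs on which A raises: a character outside the base-62
-- alphabet (KeyError) or a minuend smaller than the subtrahend (ValueError).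
def Pre_subtract_char_set_keys (a : String) (b : String) : Prop :=
  (a.toList.all (· ∈ pvChars)) = true ∧ (b.toList.all (· ∈ pvChars)) = true ∧
  b.toList.foldl (fun v c => v * 62 + pvDval c) 0 ≤ a.toList.foldl (fun v c => v * 62 + pvDval c) 0
instance (a : String) (b : String) : Decidable (Pre_subtract_char_set_keys a b) := by
  unfold Pre_subtract_char_set_keys; infer_instance

def pvWitness_subtract_char_set_keys : String × String := ("10", "2")

def Spec_subtract_char_set_keys (a : String) (b : String) (out : String) : Prop := out = subtract_char_set_keys_alt a b
instance (a : String) (b : String) (out : String) : Decidable (Spec_subtract_char_set_keys a b out) := by unfold Spec_subtract_char_set_keys; infer_instance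

-- ===== CLAIM (what is proved, stated in full; the proofs are below) =====
def Claim_equal_subtract_char_set_keys : Prop := ∀ (a : String) (b : String), Dom_subtract_char_set_keys a b → Pre_subtract_char_set_keys a b → Spec_subtract_char_set_keys a b (subtract_char_set_keys a b)

-- ===== LEMMAS AND PROOFS =====

-- value of a big-endian digit list
def pvValF (ds : List Nat) : Nat := ds.foldl (fun v d => v * 62 + d) 0
-- value of a little-endian digit list
def pvValL (ds : List Nat) : Nat := ds.foldr (fun d v => d + 62 * v) 0

theorem pvChars_nodup : pvChars.Nodup := by decide

theorem pvDval_lt {c : Char} (h : c ∈ pvChars) : pvDval c < 62 := by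
  have := List.idxOf_lt_length_of_mem h
  simpa [pvDval, show pvChars.length = 62 from by decide] using this

theorem pvGetD_dval {c : Char} (h : c ∈ pvChars) : pvChars.getD (pvDval c) '0' = c := by
  have hl : pvDval c < pvChars.length := List.idxOf_lt_length_of_mem h
  rw [List.getD_eq_getElem _ _ hl]
  exact List.getElem_idxOf hl

theorem pvDval_getD {d : Nat} (h : d < 62) : pvDval (pvChars.getD d '0') = d := by
  have hl : d < pvChars.length := by simpa [show pvChars.length = 62 from by decide] using h
  rw [List.getD_eq_getElem _ _ hl]
  exact pvChars_nodup.idxOf_getElem d hl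

theorem pvGetD_mem {d : Nat} (h : d < 62) : pvChars.getD d '0' ∈ pvChars := by
  have hl : d < pvChars.length := by simpa [show pvChars.length = 62 from by decide] using h
  rw [List.getD_eq_getElem _ _ hl]
  exact List.getElem_mem hl

theorem pvValF_init (ds : List Nat) (v : Nat) :
    ds.foldl (fun v d => v * 62 + d) v = v * 62 ^ ds.length + pvValF ds := by
  induction ds generalizing v with
  | nil => simp [pvValF]
  | cons d ds ih =>
      show List.foldl _ (v * 62 + d) ds = v * 62 ^ (d :: ds).length + pvValF (d :: ds)
      rw [ih (v * 62 + d)]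
      have h2 : pvValF (d :: ds) = (0 * 62 + d) * 62 ^ ds.length + pvValF ds := by
        simpa [pvValF] using ih (0 * 62 + d)
      rw [h2, List.length_cons]
      ring

theorem pvValF_snoc (ds : List Nat) (d : Nat) : pvValF (ds ++ [d]) = pvValF ds * 62 + d := by
  simp [pvValF]

theorem pvValL_snoc (ds : List Nat) (d : Nat) :
    pvValL (ds ++ [d]) = pvValL ds + d * 62 ^ ds.length := by
  induction ds with
  | nil => simp [pvValL]
  | cons e ds ih =>
      simp only [List.cons_append, pvValL, List.foldr_cons, List.length_cons] at *
      rw [ih]; ring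

theorem pvValL_reverse (ds : List Nat) : pvValL ds.reverse = pvValF ds := by
  induction ds with
  | nil => rfl
  | cons d ds ih =>
      rw [List.reverse_cons, pvValL_snoc, ih, List.length_reverse]
      have h2 : pvValF (d :: ds) = (0 * 62 + d) * 62 ^ ds.length + pvValF ds := by
        simpa [pvValF] using pvValF_init ds (0 * 62 + d)
      rw [h2]; ring

theorem pvValL_lt {ds : List Nat} (h : ∀ d ∈ ds, d < 62) : pvValL ds < 62 ^ ds.length := by
  induction ds with
  | nil => simp [pvValL]
  | cons d ds ih =>
      have hd := h d (List.mem_cons_self ..)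
      have hds := ih (fun x hx => h x (List.mem_cons_of_mem _ hx))
      simp only [pvValL, List.foldr_cons, List.length_cons, pow_succ] at *
      omega

-- main invariant of A's subtraction loop
theorem pvLoopA_spec : ∀ (ra rb : List Char) (borrow : Nat),
    ra.length = rb.length → borrow ≤ 1 →
    (∀ c ∈ ra, c ∈ pvChars) → (∀ c ∈ rb, c ∈ pvChars) →
    (∀ c ∈ (pvLoopA ra rb borrow).1, c ∈ pvChars) ∧
    (pvLoopA ra rb borrow).1.length = ra.length ∧
    (pvLoopA ra rb borrow).2 ≤ 1 ∧
    pvValL ((pvLoopA ra rb borrow).1.map pvDval) + pvValL (rb.map pvDval) + borrow =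
      pvValL (ra.map pvDval) + (pvLoopA ra rb borrow).2 * 62 ^ ra.length := by
  intro ra
  induction ra with
  | nil => intro rb borrow hlen hb _ _; cases rb with
      | nil => simp [pvLoopA, pvValL]; omega
      | cons _ _ => simp at hlen
  | cons ca ra ih =>
      intro rb borrow hlen hb hva hvb
      cases rb with
      | nil => simp at hlen
      | cons cb rb =>
        have hlen' : ra.length = rb.length := by simpa using hlen
        have hda : pvDval ca < 62 := pvDval_lt (hva ca (List.mem_cons_self ..))
        have hdb : pvDval cb < 62 := pvDval_lt (hvb cb (List.mem_cons_self ..))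
        have hva' : ∀ c ∈ ra, c ∈ pvChars := fun c hc => hva c (List.mem_cons_of_mem _ hc)
        have hvb' : ∀ c ∈ rb, c ∈ pvChars := fun c hc => hvb c (List.mem_cons_of_mem _ hc)
        by_cases hlt : pvDval ca < pvDval cb + borrow
        · obtain ⟨m1, m2, m3, m4⟩ := ih rb 1 hlen' (le_refl 1) hva' hvb'
          have heq : pvLoopA (ca :: ra) (cb :: rb) borrow =
              (pvChars.getD (pvDval ca + 62 - (pvDval cb + borrow)) '0' :: (pvLoopA ra rb 1).1,
               (pvLoopA ra rb 1).2) := by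
            simp [pvLoopA, hlt]
          rw [heq]
          have hd62 : pvDval ca + 62 - (pvDval cb + borrow) < 62 := by omega
          refine ⟨?_, by simpa using m2, m3, ?_⟩
          · intro c hc
            rcases List.mem_cons.mp hc with h | h
            · exact h ▸ pvGetD_mem hd62
            · exact m1 c h
          · simp only [List.map_cons, pvValL, List.foldr_cons, List.length_cons] at m4 ⊢
            rw [pvDval_getD hd62]
            have hp : (62 : Nat) ^ (ra.length + 1) = 62 * 62 ^ ra.length := by ring
            rw [hp]
            rcases Nat.le_one_iff_eq_zero_or_eq_one.mp m3 with h0 | h1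
            · rw [h0] at m4 ⊢; omega
            · rw [h1] at m4 ⊢; omega
        · obtain ⟨m1, m2, m3, m4⟩ := ih rb 0 hlen' (by omega) hva' hvb'
          have heq : pvLoopA (ca :: ra) (cb :: rb) borrow =
              (pvChars.getD (pvDval ca - (pvDval cb + borrow)) '0' :: (pvLoopA ra rb 0).1,
               (pvLoopA ra rb 0).2) := by
            simp [pvLoopA, hlt]
          rw [heq]
          have hd62 : pvDval ca - (pvDval cb + borrow) < 62 := by omega
          refine ⟨?_, by simpa using m2, m3, ?_⟩
          · intro c hc
            rcases List.mem_cons.mp hc with h | h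
            · exact h ▸ pvGetD_mem hd62
            · exact m1 c h
          · simp only [List.map_cons, pvValL, List.foldr_cons, List.length_cons] at m4 ⊢
            rw [pvDval_getD hd62]
            have hp : (62 : Nat) ^ (ra.length + 1) = 62 * 62 ^ ra.length := by ring
            rw [hp]
            rcases Nat.le_one_iff_eq_zero_or_eq_one.mp m3 with h0 | h1
            · rw [h0] at m4 ⊢; omega
            · rw [h1] at m4 ⊢; omega

-- canonical form: pvEncode inverts pvValF on digit strings without leading zero
theorem pvDval_ne_zero {c : Char} (hm : c ∈ pvChars) (hc : c ≠ '0') : pvDval c ≠ 0 := by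
  intro h0
  apply hc
  have := pvGetD_dval hm
  rw [h0] at this
  simpa using this.symm

theorem pvValF_pos {c : Char} {cs : List Char} (hm : c ∈ pvChars) (hc : c ≠ '0') :
    0 < pvValF ((c :: cs).map pvDval) := by
  have h1 : pvValF ((c :: cs).map pvDval) =
      (0 * 62 + pvDval c) * 62 ^ (cs.map pvDval).length + pvValF (cs.map pvDval) := by
    simpa [pvValF] using pvValF_init (cs.map pvDval) (0 * 62 + pvDval c)
  have h2 := pvDval_ne_zero hm hc
  have h3 : 0 < (62 : Nat) ^ (cs.map pvDval).length := Nat.pow_pos (by norm_num)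
  simp only [Nat.zero_mul, Nat.zero_add] at h1
  rw [h1]
  have h5 : 1 * 1 ≤ pvDval c * 62 ^ (cs.map pvDval).length := Nat.mul_le_mul (by omega) h3
  omega

theorem pvEncode_canon (cs : List Char) (hv : ∀ c ∈ cs, c ∈ pvChars)
    (hh : cs = [] ∨ ∃ c cs', cs = c :: cs' ∧ c ≠ '0') :
    pvEncode (pvValF (cs.map pvDval)) = cs := by
  induction cs using List.reverseRecOn with
  | nil => simp [pvValF, pvEncode]
  | append_singleton cs c ih =>
      have hcm : c ∈ pvChars := hv c (by simp)
      have hcd : pvDval c < 62 := pvDval_lt hcm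
      have hsnoc : pvValF ((cs ++ [c]).map pvDval) = pvValF (cs.map pvDval) * 62 + pvDval c := by
        rw [List.map_append]; simpa using pvValF_snoc (cs.map pvDval) (pvDval c)
      have hv' : ∀ x ∈ cs, x ∈ pvChars := fun x hx => hv x (List.mem_append_left _ hx)
      have hn : pvValF ((cs ++ [c]).map pvDval) ≠ 0 := by
        cases cs with
        | nil =>
            rcases hh with h | ⟨c0, cs0, heq, hc0⟩
            · simp at h
            · simp only [List.nil_append, List.cons.injEq] at heq
              rw [hsnoc]
              have := pvDval_ne_zero hcm (heq.1 ▸ hc0)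
              simp [pvValF]
              omega
        | cons c0 cs0 =>
            rcases hh with h | ⟨c1, cs1, heq, hc1⟩
            · simp at h
            · simp only [List.cons_append, List.cons.injEq] at heq
              have hpos := pvValF_pos (cs := cs0) (hv' c0 (List.mem_cons_self ..)) (heq.1 ▸ hc1)
              rw [hsnoc]
              omega
      rw [hsnoc] at hn ⊢
      rw [pvEncode, dif_neg hn]
      have hdiv : (pvValF (cs.map pvDval) * 62 + pvDval c) / 62 = pvValF (cs.map pvDval) := by
        omega
      have hmod : (pvValF (cs.map pvDval) * 62 + pvDval c) % 62 = pvDval c := by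
        omega
      rw [hdiv, hmod, pvGetD_dval hcm]
      have hh' : cs = [] ∨ ∃ x xs, cs = x :: xs ∧ x ≠ '0' := by
        cases cs with
        | nil => exact Or.inl rfl
        | cons c0 cs0 =>
            rcases hh with h | ⟨c1, cs1, heq, hc1⟩
            · simp at h
            · simp only [List.cons_append, List.cons.injEq] at heq
              exact Or.inr ⟨c0, cs0, rfl, heq.1 ▸ hc1⟩
      rw [ih hv' hh']

theorem pvDropWhile_encode (cs : List Char) (hv : ∀ c ∈ cs, c ∈ pvChars) :
    cs.dropWhile (· = '0') = pvEncode (pvValF (cs.map pvDval)) := by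
  induction cs with
  | nil => simp [pvValF, pvEncode]
  | cons c cs ih =>
      have hv' : ∀ x ∈ cs, x ∈ pvChars := fun x hx => hv x (List.mem_cons_of_mem _ hx)
      by_cases hc : c = '0'
      · subst hc
        have hz : pvDval '0' = 0 := by decide
        have hval : pvValF (('0' :: cs).map pvDval) = pvValF (cs.map pvDval) := by
          simp [pvValF, hz]
        rw [hval, List.dropWhile_cons_of_pos (by simp)]
        exact ih hv'
      · rw [List.dropWhile_cons_of_neg (by simpa using hc)]
        exact (pvEncode_canon (c :: cs) hv (Or.inr ⟨c, cs, rfl, hc⟩)).symm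

-- padding with '0' does not change the decoded value
theorem pvValF_pad (k : Nat) (ds : List Nat) :
    pvValF (List.replicate k 0 ++ ds) = pvValF ds := by
  induction k with
  | zero => simp
  | succ k ih => simpa [pvValF, List.replicate_succ] using ih

-- the core equality, stated over the underlying character lists
theorem pvMain (la lb : List Char)
    (hva : ∀ c ∈ la, c ∈ pvChars) (hvb : ∀ c ∈ lb, c ∈ pvChars)
    (hle : lb.foldl (fun v c => v * 62 + pvDval c) 0 ≤ la.foldl (fun v c => v * 62 + pvDval c) 0) :
    (let maxLen := max la.length lb.length
     let pa := List.replicate (maxLen - la.length) '0' ++ la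
     let pb := List.replicate (maxLen - lb.length) '0' ++ lb
     let r := pvLoopA pa.reverse pb.reverse 0
     let stripped := r.1.reverse.dropWhile (· = '0')
     String.mk (if stripped = [] then ['0'] else stripped)) =
    (let va := la.foldl (fun v c => v * 62 + pvDval c) 0
     let vb := lb.foldl (fun v c => v * 62 + pvDval c) 0
     if va < vb then "0"
     else
       let ds := pvEncode (va - vb)
       if ds = [] then "0" else String.mk ds) := by
  dsimp only
  set maxLen := max la.length lb.length with hmax
  set pa := List.replicate (maxLen - la.length) '0' ++ la with hpa
  set pb := List.replicate (maxLen - lb.length) '0' ++ lb with hpb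
  set va := la.foldl (fun v c => v * 62 + pvDval c) 0 with hvaD
  set vb := lb.foldl (fun v c => v * 62 + pvDval c) 0 with hvbD
  clear_value maxLen pa pb va vb
  have hpalen : pa.length = maxLen := by
    simp only [hpa, List.length_append, List.length_replicate]
    have := Nat.le_max_left la.length lb.length
    omega
  have hpblen : pb.length = maxLen := by
    simp only [hpb, List.length_append, List.length_replicate]
    have := Nat.le_max_right la.length lb.length
    omega
  have hpam : ∀ c ∈ pa, c ∈ pvChars := by
    intro c hc
    rw [hpa] at hc
    rcases List.mem_append.mp hc with h | h
    · rw [List.eq_of_mem_replicate h]; decide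
    · exact hva c h
  have hpbm : ∀ c ∈ pb, c ∈ pvChars := by
    intro c hc
    rw [hpb] at hc
    rcases List.mem_append.mp hc with h | h
    · rw [List.eq_of_mem_replicate h]; decide
    · exact hvb c h
  obtain ⟨m1, m2, m3, m4⟩ := pvLoopA_spec pa.reverse pb.reverse 0
    (by simp [hpalen, hpblen]) (by omega)
    (fun c hc => hpam c (List.mem_reverse.mp hc))
    (fun c hc => hpbm c (List.mem_reverse.mp hc))
  -- decoded values of the padded lists equal va and vb
  have hfa : pvValL ((pvLoopA pa.reverse pb.reverse 0).1.map pvDval) + vb =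
      va + (pvLoopA pa.reverse pb.reverse 0).2 * 62 ^ maxLen := by
    have h1 : pvValL (pa.reverse.map pvDval) = va := by
      rw [List.map_reverse, pvValL_reverse]
      have : pa.map pvDval = List.replicate (maxLen - la.length) 0 ++ la.map pvDval := by
        rw [hpa, List.map_append, List.map_replicate, show pvDval '0' = 0 from by decide]
      rw [this, pvValF_pad]
      simp [pvValF, List.foldl_map, hvaD]
    have h2 : pvValL (pb.reverse.map pvDval) = vb := by
      rw [List.map_reverse, pvValL_reverse]
      have : pb.map pvDval = List.replicate (maxLen - lb.length) 0 ++ lb.map pvDval := by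
        rw [hpb, List.map_append, List.map_replicate, show pvDval '0' = 0 from by decide]
      rw [this, pvValF_pad]
      simp [pvValF, List.foldl_map, hvbD]
    rw [h1, h2, List.length_reverse, hpalen] at m4
    omega
  -- the final borrow is zero
  have hres_lt : pvValL ((pvLoopA pa.reverse pb.reverse 0).1.map pvDval) < 62 ^ maxLen := by
    have := pvValL_lt (ds := (pvLoopA pa.reverse pb.reverse 0).1.map pvDval)
      (by intro d hd
          obtain ⟨c, hc, rfl⟩ := List.mem_map.mp hd
          exact pvDval_lt (m1 c hc))
    rwa [List.length_map, m2, List.length_reverse, hpalen] at this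
  have hbo : (pvLoopA pa.reverse pb.reverse 0).2 = 0 := by
    rcases Nat.le_one_iff_eq_zero_or_eq_one.mp m3 with h | h
    · exact h
    · rw [h] at hfa; omega
  rw [hbo] at hfa
  -- the stripped result is exactly B's encoding of va - vb
  have hstr : (pvLoopA pa.reverse pb.reverse 0).1.reverse.dropWhile (· = '0') =
      pvEncode (va - vb) := by
    rw [pvDropWhile_encode _ (fun c hc => m1 c (List.mem_reverse.mp hc))]
    congr 1
    rw [List.map_reverse]
    have := pvValL_reverse ((pvLoopA pa.reverse pb.reverse 0).1.map pvDval).reverse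
    rw [List.reverse_reverse] at this
    rw [← this]
    omega
  rw [if_neg (not_lt.mpr hle), hstr]
  by_cases hz : pvEncode (va - vb) = []
  · rw [hz]; decide
  · rw [if_neg hz, if_neg hz]

-- ===== VERDICT (by name: the statement is the Claim_ definition above) =====
theorem subtract_char_set_keys_spec : Claim_equal_subtract_char_set_keys := by
  intro a b _ hpre
  obtain ⟨h1, h2, h3⟩ := hpre
  unfold Spec_subtract_char_set_keys subtract_char_set_keys subtract_char_set_keys_alt
  exact pvMain a.toList b.toList
    (fun c hc => by simpa using List.all_eq_true.mp h1 c hc)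
    (fun c hc => by simpa using List.all_eq_true.mp h2 c hc) h3
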